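-- pv_equiv track=rewrite | github.com/yaroslav-94/algo | AT&PM/dynamic_programming/my_solutions/max_subseq.py | lis_bottom_up
-- ===== SOURCE A (Python) =====
-- def lis_bottom_up(arr: list):
--     d = [0 for _ in range(len(arr))]
--     for i in range(len(arr)):
--         d[i] = 1
--         for j in range(i):
--             if arr[i] % arr[j] and d[j] + 1 > d[i]:
--                 d[i] = d[j] + 1
--     answer = 0
--     for i in d:
--         if i > answer:
--             answer = i
--     return answer
-- ===== SOURCE B (Python) =====
-- def lis_bottom_up(arr: list):
--     memo = {}
--
--     def best(i):
--         if i not in memo: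
--             memo[i] = 1 + max((best(j) for j in range(i) if arr[i] % arr[j]),
--                               default=0)
--         return memo[i]
--
--     return max((best(i) for i in range(len(arr))), default=0)
-- ===== Notes on version B (the rewrite author's own statement) =====
-- stated objective: alternative
-- what changed: Replaces the bottom-up mutable DP table with a top-down memoized recursion best(i) = 1 + max(best(j) for earlier j with arr[i] % arr[j] != 0, default 0), taking the max of best over all indices.
import Mathlib
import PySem

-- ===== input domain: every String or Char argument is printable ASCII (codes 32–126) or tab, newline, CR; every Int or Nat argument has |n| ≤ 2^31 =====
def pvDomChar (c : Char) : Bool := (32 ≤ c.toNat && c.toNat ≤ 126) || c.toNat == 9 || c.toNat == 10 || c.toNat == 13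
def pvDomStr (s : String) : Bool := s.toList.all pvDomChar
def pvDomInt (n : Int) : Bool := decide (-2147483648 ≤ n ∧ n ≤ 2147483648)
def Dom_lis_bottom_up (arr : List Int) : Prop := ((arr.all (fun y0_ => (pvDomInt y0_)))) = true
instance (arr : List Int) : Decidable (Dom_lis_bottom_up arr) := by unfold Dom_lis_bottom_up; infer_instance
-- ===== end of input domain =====

-- B replaces A's bottom-up mutable DP table with a top-down recursion
-- best(i) = 1 + max of best(j) over earlier j with arr[i] % arr[j] != 0 (memoized in Python);
-- objective: alternative decomposition, same cost.


-- ===== PORT A =====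
def lis_bottom_up (arr : List Int) : Int :=
  let d : List Int := (List.range arr.length).map (fun _ => 0)
  let d := (List.range arr.length).foldl (fun d i =>
      let d := d.set i 1
      (List.range i).foldl (fun d j =>
        if PySem.Int.mod (arr.getD i 0) (arr.getD j 0) ≠ 0 ∧ d.getD j 0 + 1 > d.getD i 0
        then d.set i (d.getD j 0 + 1) else d) d) d
  d.foldl (fun answer i => if i > answer then i else answer) 0

-- ===== PORT B =====
-- best(i) of Source B; the Python memo dict is a pure cache, its stored value is this recursion.
def pvBest (arr : List Int) (i : Nat) : Int :=
  1 + ((((List.range i).filter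
          (fun j => PySem.Int.mod (arr.getD i 0) (arr.getD j 0) ≠ 0)).attach.map
        (fun j => pvBest arr j.1)).max?.getD 0)
termination_by i
decreasing_by
  have hj := j.2
  simp only [List.mem_filter, List.mem_range] at hj
  exact hj.1

def lis_bottom_up_alt (arr : List Int) : Int :=
  (PySem.List.max? ((List.range arr.length).map (fun i => pvBest arr i)) (fun y => y)).getD 0

-- ===== PRECONDITION & SPEC =====
-- Pre_ excludes exactly the inputs where Python A raises ZeroDivisionError
-- (a 0 anywhere before the last position); Python B raises there too.
def Pre_lis_bottom_up (arr : List Int) : Prop := (0 : Int) ∉ arr.dropLast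
instance (arr : List Int) : Decidable (Pre_lis_bottom_up arr) := by unfold Pre_lis_bottom_up; infer_instance
def pvWitness_lis_bottom_up : List Int := [2, 3, 4]

def Spec_lis_bottom_up (arr : List Int) (out : Int) : Prop := out = lis_bottom_up_alt arr
instance (arr : List Int) (out : Int) : Decidable (Spec_lis_bottom_up arr out) := by unfold Spec_lis_bottom_up; infer_instance

-- ===== CLAIM (what is proved, stated in full; the proofs are below) =====
def Claim_equal_lis_bottom_up : Prop := ∀ (arr : List Int), Dom_lis_bottom_up arr → Pre_lis_bottom_up arr → Spec_lis_bottom_up arr (lis_bottom_up arr)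

-- ===== LEMMAS AND PROOFS =====

-- the Python condition "arr[i] % arr[j] != 0" (index i on the left, j on the right)
abbrev pvC (arr : List Int) (i j : Nat) : Prop := PySem.Int.mod (arr.getD i 0) (arr.getD j 0) ≠ 0

theorem pvBest_unfold (arr : List Int) (i : Nat) :
    pvBest arr i =
      1 + ((((List.range i).filter (fun j => decide (pvC arr i j))).map
            (fun j => pvBest arr j)).max?.getD 0) := by
  rw [pvBest]
  simp [List.map_attach_eq_pmap, List.map_pmap, List.pmap_eq_map, pvC]

theorem pvBest_pos (arr : List Int) (i : Nat) : 1 ≤ pvBest arr i := by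
  induction i using Nat.strong_induction_on with
  | _ i ih =>
    rw [pvBest_unfold]
    rcases h : (((List.range i).filter (fun j => decide (pvC arr i j))).map
        (fun j => pvBest arr j)).max? with _ | m
    · simp
    · have hm := List.max?_mem h
      simp only [List.mem_map, List.mem_filter, List.mem_range] at hm
      obtain ⟨j, ⟨hj, _⟩, rfl⟩ := hm
      have := ih j hj
      simp only [Option.getD_some]
      omega

theorem pv_foldl_if_filter (arr : List Int) (i : Nat) :
    ∀ (l : List Nat) (v : Int),
      l.foldl (fun v j => if pvC arr i j ∧ pvBest arr j + 1 > v then pvBest arr j + 1 else v) v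
        = ((l.filter (fun j => decide (pvC arr i j))).map (fun j => pvBest arr j)).foldl
            (fun a b => max a (b + 1)) v := by
  intro l
  induction l with
  | nil => intro v; rfl
  | cons j t ih =>
    intro v
    by_cases hc : pvC arr i j
    · have hcb : decide (pvC arr i j) = true := decide_eq_true hc
      simp only [List.foldl_cons, List.filter_cons, hcb, if_true, List.map_cons]
      rw [ih]
      congr 1
      by_cases h : pvBest arr j + 1 > v
      · rw [if_pos ⟨hc, h⟩, max_eq_right (le_of_lt h)]
      · rw [if_neg (fun hcon => h hcon.2), max_eq_left (by omega)]
    · have hcb : decide (pvC arr i j) = false := decide_eq_false hc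
      simp only [List.foldl_cons]
      rw [if_neg (fun hcon => hc hcon.1)]
      simp only [List.filter_cons, hcb, Bool.false_eq_true, if_false]
      exact ih v

theorem pv_foldl_max_succ : ∀ (ys : List Int) (v : Int),
    ys.foldl (fun a b => max a (b + 1)) v = ys.foldl max (v - 1) + 1 := by
  intro ys
  induction ys with
  | nil => intro v; simp only [List.foldl_nil]; omega
  | cons y t ih =>
    intro v
    simp only [List.foldl_cons]
    rw [ih, show max v (y + 1) - 1 = max (v - 1) y from by
      rcases le_total v (y + 1) with h | h
      · rw [max_eq_right h, max_eq_right (by omega)]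
        omega
      · rw [max_eq_left h, max_eq_left (by omega)]]

-- Python max(xs) with nonnegative elements against the running-max loop, Mathlib Option form
theorem pv_foldl_max_eq_getDmax? (ys : List Int) (h : ∀ y ∈ ys, 0 ≤ y) :
    ys.foldl max 0 = ys.max?.getD 0 := by
  cases ys with
  | nil => rfl
  | cons y t =>
    rw [List.max?_cons']
    simp only [Option.getD_some, List.foldl_cons]
    rw [max_eq_right (h y (by simp))]

-- and the PySem form used by the port of B (Python max(gen, default=0))
theorem pv_foldl_max_eq_max? (ys : List Int) (h : ∀ y ∈ ys, 0 ≤ y) :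
    ys.foldl max 0 = (PySem.List.max? ys (fun y => y)).getD 0 := by
  cases ys with
  | nil => rfl
  | cons y t =>
    rw [PySem.List.max?_id_cons]
    simp only [Option.getD_some, List.foldl_cons]
    rw [max_eq_right (h y (by simp))]

-- A's inner loop, read as a running max starting at 1, computes best i
theorem pvBest_eq_fold (arr : List Int) (i : Nat) :
    (List.range i).foldl
        (fun v j => if pvC arr i j ∧ pvBest arr j + 1 > v then pvBest arr j + 1 else v) 1
      = pvBest arr i := by
  rw [pv_foldl_if_filter, pvBest_unfold, pv_foldl_max_succ,
    show (1 : Int) - 1 = 0 from by norm_num,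
    pv_foldl_max_eq_getDmax? _ (by
      intro y hy
      simp only [List.mem_map] at hy
      obtain ⟨j, _, rfl⟩ := hy
      have := pvBest_pos arr j
      omega)]
  omega

-- the inner loop only rewrites position k of the table; earlier entries stay best j
theorem pv_inner_fold (arr : List Int) (k : Nat) (R : List Int) :
    ∀ (l : List Nat), (∀ j ∈ l, j < k) → ∀ (v : Int),
      l.foldl (fun d j =>
          if PySem.Int.mod (arr.getD k 0) (arr.getD j 0) ≠ 0 ∧ d.getD j 0 + 1 > d.getD k 0
          then d.set k (d.getD j 0 + 1) else d)
        ((List.range k).map (fun j => pvBest arr j) ++ v :: R)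
      = (List.range k).map (fun j => pvBest arr j) ++
          (l.foldl (fun v j => if pvC arr k j ∧ pvBest arr j + 1 > v then pvBest arr j + 1 else v) v) :: R := by
  intro l
  induction l with
  | nil => intro _ v; rfl
  | cons j t ih =>
    intro hl v
    have hj : j < k := hl j (by simp)
    have h1 : ((List.range k).map (fun j => pvBest arr j) ++ v :: R).getD j 0 = pvBest arr j := by
      rw [List.getD_append _ _ _ _ (by simp [hj]), List.getD_eq_getElem _ _ (by simp [hj])]
      simp
    have h2 : ((List.range k).map (fun j => pvBest arr j) ++ v :: R).getD k 0 = v := by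
      rw [List.getD_append_right _ _ _ _ (by simp)]
      simp
    have h3 : ∀ x : Int, ((List.range k).map (fun j => pvBest arr j) ++ v :: R).set k x
        = (List.range k).map (fun j => pvBest arr j) ++ x :: R := by
      intro x
      rw [List.set_append_right _ _ (by simp)]
      simp
    simp only [List.foldl_cons, h1, h2, h3, pvC]
    by_cases hc : PySem.Int.mod (arr.getD k 0) (arr.getD j 0) ≠ 0 ∧ pvBest arr j + 1 > v
    · simp only [if_pos hc]
      exact ih (fun x hx => hl x (List.mem_cons_of_mem _ hx)) _
    · simp only [if_neg hc]
      exact ih (fun x hx => hl x (List.mem_cons_of_mem _ hx)) v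

-- A's outer loop invariant: after k steps the table is best 0 .. best (k-1), zeros after
theorem pv_outer (arr : List Int) :
    ∀ (k : Nat), k ≤ arr.length →
      (List.range k).foldl (fun d i =>
          (List.range i).foldl (fun d j =>
            if PySem.Int.mod (arr.getD i 0) (arr.getD j 0) ≠ 0 ∧ d.getD j 0 + 1 > d.getD i 0
            then d.set i (d.getD j 0 + 1) else d) (d.set i 1))
        ((List.range arr.length).map (fun _ => (0:Int)))
      = (List.range k).map (fun j => pvBest arr j) ++ List.replicate (arr.length - k) (0:Int) := by
  intro k
  induction k with
  | zero =>
    intro _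
    simp [List.map_const']
  | succ k ih =>
    intro hk
    have hkn : k < arr.length := hk
    rw [List.range_succ, List.foldl_append, ih (le_of_lt hkn)]
    simp only [List.foldl_cons, List.foldl_nil]
    rw [show arr.length - k = (arr.length - (k + 1)) + 1 from by omega, List.replicate_succ]
    have hset : (((List.range k).map (fun j => pvBest arr j)) ++
          (0:Int) :: List.replicate (arr.length - (k + 1)) 0).set k 1
        = ((List.range k).map (fun j => pvBest arr j)) ++
          (1:Int) :: List.replicate (arr.length - (k + 1)) 0 := by
      rw [List.set_append_right _ _ (by simp)]
      simp
    rw [hset,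
      pv_inner_fold arr k (List.replicate (arr.length - (k + 1)) 0) (List.range k)
        (fun j hj => List.mem_range.mp hj) 1,
      pvBest_eq_fold]
    simp

-- A's answer loop is the running max
theorem pv_answer_fold (l : List Int) :
    l.foldl (fun answer i => if i > answer then i else answer) 0 = l.foldl max 0 := by
  have hf : (fun (answer i : Int) => if i > answer then i else answer) = fun a b => max a b := by
    funext a b
    by_cases h : b > a
    · rw [if_pos h, max_eq_right (le_of_lt h)]
    · rw [if_neg h, max_eq_left (by omega)]
  rw [hf]

-- ===== VERDICT (by name: the statement is the Claim_ definition above) =====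
theorem lis_bottom_up_spec : Claim_equal_lis_bottom_up := by
  intro arr _ _
  unfold Spec_lis_bottom_up
  simp only [lis_bottom_up, lis_bottom_up_alt]
  rw [pv_outer arr arr.length le_rfl]
  simp only [Nat.sub_self, List.replicate_zero, List.append_nil]
  rw [pv_answer_fold]
  exact pv_foldl_max_eq_max? _ (by
    intro y hy
    simp only [List.mem_map] at hy
    obtain ⟨j, _, rfl⟩ := hy
    have := pvBest_pos arr j
    omega)
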